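-- pv_equiv track=rewrite | github.com/shilpas1003/PythonBeginner_v1 | MaxiMumSubArrayEasy.py | NumOfSubArray
-- ===== SOURCE A (Python) =====
-- def NumOfSubArray(A,B):
--     n = len(A)
--     count = 0
--     for s in range(n):
--         sum = 0
--         for e in range(s, n):
--            sum += A[e]
--            if sum <= B:
--             count += 1
--     return count
-- ===== SOURCE B (Python) =====
-- # Prefix sums + a sorted list of previous prefix sums queried by hand-written
-- # binary search: each end index contributes (number of earlier prefixes >= p - B).
--
-- def _bisect_left(lst, x, lo, hi):
--     # first index i in [lo, hi] with lst[i] >= x (lst sorted ascending)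
--     if lo < hi:
--         mid = (lo + hi) // 2
--         if lst[mid] < x:
--             return _bisect_left(lst, x, mid + 1, hi)
--         else:
--             return _bisect_left(lst, x, lo, mid)
--     return lo
--
--
-- def NumOfSubArray(A, B):
--     count = 0
--     p = 0
--     prefs = [0]
--     for x in A:
--         p += x
--         i = _bisect_left(prefs, p - B, 0, len(prefs))
--         count += len(prefs) - i
--         j = _bisect_left(prefs, p, 0, len(prefs))
--         prefs = prefs[:j] + [p] + prefs[j:]
--     return count
-- ===== Notes on version B (the rewrite author's own statement) =====
-- stated objective: faster
-- what changed: Replaces the nested start/end loops by a single pass over prefix sums that maintains the earlier prefix sums in a sorted list and, for each end index, counts the earlier prefixes >= p-B with a hand-written binary search.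
import Mathlib
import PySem

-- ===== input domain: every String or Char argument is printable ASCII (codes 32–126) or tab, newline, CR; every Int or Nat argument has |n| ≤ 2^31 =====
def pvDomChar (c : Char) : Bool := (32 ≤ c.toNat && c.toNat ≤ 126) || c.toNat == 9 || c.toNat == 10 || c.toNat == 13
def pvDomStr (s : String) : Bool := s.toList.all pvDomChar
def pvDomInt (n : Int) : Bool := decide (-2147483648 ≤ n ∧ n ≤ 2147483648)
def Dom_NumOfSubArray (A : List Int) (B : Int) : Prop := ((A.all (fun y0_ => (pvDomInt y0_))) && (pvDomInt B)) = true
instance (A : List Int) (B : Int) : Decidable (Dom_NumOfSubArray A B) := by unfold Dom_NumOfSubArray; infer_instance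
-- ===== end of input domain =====

-- B replaces A's nested start/end loops by one pass over prefix sums kept in a sorted
-- list, counting the earlier prefixes ≥ p - B by binary search (measured faster; same values).

-- ===== PORT A =====
-- inner loop body of A: running sum over A[e], count += 1 when sum <= B
def aInnerStep (A : List Int) (B : Int) (st : Int × Int) (e : Int) : Int × Int :=
  let sum := st.1 + PySem.List.pyGetD A e 0   -- A[e]; index always in range here
  (sum, if sum ≤ B then st.2 + 1 else st.2)

def NumOfSubArray (A : List Int) (B : Int) : Int :=
  let n : Int := A.length
  (PySem.List.pyRange 0 n).foldl
    (fun count s => ((PySem.List.pyRange s n).foldl (aInnerStep A B) (0, count)).2) 0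

-- ===== PORT B =====
-- hand-written recursive bisect_left from Source B, step for step
def pyBisectLeft (lst : List Int) (x lo hi : Int) : Int :=
  if lo < hi then
    let mid := PySem.Int.floordiv (lo + hi) 2
    if PySem.List.pyGetD lst mid 0 < x then   -- lst[mid]; index always in range here
      pyBisectLeft lst x (mid + 1) hi
    else
      pyBisectLeft lst x lo mid
  else lo
termination_by (hi - lo).toNat
decreasing_by
  all_goals
    simp only [PySem.Int.floordiv_eq_ediv_of_pos (by norm_num : (0:Int) < 2)]
    omega

-- loop body of Source B's single pass: state (count, p, prefs)
def altStep (B : Int) (st : Int × Int × List Int) (x : Int) : Int × Int × List Int :=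
  let count := st.1
  let p := st.2.1 + x
  let prefs := st.2.2
  let i := pyBisectLeft prefs (p - B) 0 prefs.length
  let count' := count + ((prefs.length : Int) - i)
  let j := pyBisectLeft prefs p 0 prefs.length
  (count', p, PySem.List.slice prefs none (some j) ++ [p] ++ PySem.List.slice prefs (some j) none)

def NumOfSubArray_alt (A : List Int) (B : Int) : Int :=
  (A.foldl (altStep B) (0, 0, [0])).1

-- ===== PRECONDITION & SPEC =====
def Spec_NumOfSubArray (A : List Int) (B : Int) (out : Int) : Prop := out = NumOfSubArray_alt A B
instance (A : List Int) (B : Int) (out : Int) : Decidable (Spec_NumOfSubArray A B out) := by unfold Spec_NumOfSubArray; infer_instance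

-- ===== CLAIM (what is proved, stated in full; the proofs are below) =====
def Claim_equal_NumOfSubArray : Prop := ∀ (A : List Int) (B : Int), Dom_NumOfSubArray A B → Spec_NumOfSubArray A B (NumOfSubArray A B)

-- ===== LEMMAS AND PROOFS =====

-- nonempty prefix sums of a list
def npres : List Int → List Int
  | [] => []
  | x :: t => x :: (npres t).map (x + ·)

-- all prefix sums of c, including the empty prefix (model of Source B's `prefs` as a multiset)
def presL (c : List Int) : List Int := (List.range (c.length + 1)).map (fun k => ((c.take k).sum : Int))

-- A's value as a sum over start indices
def aSum (A : List Int) (B : Int) : Int :=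
  ((List.range A.length).map (fun s => (List.countP (fun t => decide (t ≤ B)) (npres (A.drop s)) : Int))).sum

-- the same pairs counted end-first (B's traversal order)
def gcount (B : Int) : List Int → List Int → Int
  | _, [] => 0
  | c, x :: r => (List.countP (fun q => decide (c.sum + x - q ≤ B)) (presL c) : Int) + gcount B (c ++ [x]) r

lemma count_eq_of_split (l : List Int) (x : Int) (k : Nat) (hk : k ≤ l.length)
    (hlow : ∀ j (h : j < l.length), j < k → l[j] < x)
    (hhigh : ∀ j (h : j < l.length), k ≤ j → x ≤ l[j]) :
    l.countP (fun q => decide (q < x)) = k := by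
  conv_lhs => rw [← List.take_append_drop k l]
  rw [List.countP_append]
  have h1 : (l.take k).countP (fun q => decide (q < x)) = k := by
    rw [List.countP_eq_length_filter, List.filter_eq_self.2, List.length_take]
    · omega
    · intro a ha
      rw [List.mem_iff_getElem] at ha
      obtain ⟨i, hi, rfl⟩ := ha
      rw [List.getElem_take]
      simp only [List.length_take] at hi
      exact decide_eq_true (hlow i (by omega) (by omega))
  have h2 : (l.drop k).countP (fun q => decide (q < x)) = 0 := by
    rw [List.countP_eq_zero]
    intro a ha
    rw [List.mem_iff_getElem] at ha
    obtain ⟨i, hi, rfl⟩ := ha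
    rw [List.getElem_drop]
    simp only [List.length_drop] at hi
    have := hhigh (k + i) (by omega) (by omega)
    simp only [decide_eq_true_eq]
    omega
  omega

lemma bl_count (l : List Int) (x : Int) (hs : l.Pairwise (· ≤ ·)) :
    ∀ (lo hi : Int), 0 ≤ lo → lo ≤ hi → hi ≤ l.length →
    (∀ j : Nat, (j : Int) < lo → ∀ h : j < l.length, l[j] < x) →
    (∀ j : Nat, hi ≤ (j : Int) → ∀ h : j < l.length, x ≤ l[j]) →
    pyBisectLeft l x lo hi = (l.countP (fun q => decide (q < x)) : Int) := by
  have hmono : ∀ (i j : Nat) (hi : i < l.length) (hj : j < l.length), i ≤ j → l[i] ≤ l[j] := by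
    intro i j hi hj hij
    rcases Nat.lt_or_ge i j with h | h
    · exact (List.pairwise_iff_getElem.1 hs) i j hi hj h
    · have : i = j := by omega
      subst this; rfl
  have H : ∀ n : Nat, ∀ (lo hi : Int), (hi - lo).toNat ≤ n → 0 ≤ lo → lo ≤ hi → hi ≤ l.length →
      (∀ j : Nat, (j : Int) < lo → ∀ h : j < l.length, l[j] < x) →
      (∀ j : Nat, hi ≤ (j : Int) → ∀ h : j < l.length, x ≤ l[j]) →
      pyBisectLeft l x lo hi = (l.countP (fun q => decide (q < x)) : Int) := by
    intro n
    induction n with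
    | zero =>
      intro lo hi hn h0 hlh hhl hlow hhigh
      have heq : lo = hi := by omega
      rw [pyBisectLeft]
      simp only [if_neg (by omega : ¬ lo < hi)]
      subst heq
      have : l.countP (fun q => decide (q < x)) = lo.toNat := by
        apply count_eq_of_split l x lo.toNat (by omega)
        · intro j hj hjk; exact hlow j (by omega) hj
        · intro j hj hjk; exact hhigh j (by omega) hj
      rw [this]; omega
    | succ n ih =>
      intro lo hi hn h0 hlh hhl hlow hhigh
      rcases eq_or_lt_of_le hlh with heq | hlt
      · rw [pyBisectLeft]
        simp only [if_neg (by omega : ¬ lo < hi)]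
        subst heq
        have : l.countP (fun q => decide (q < x)) = lo.toNat := by
          apply count_eq_of_split l x lo.toNat (by omega)
          · intro j hj hjk; exact hlow j (by omega) hj
          · intro j hj hjk; exact hhigh j (by omega) hj
        rw [this]; omega
      · set mid := PySem.Int.floordiv (lo + hi) 2 with hmid
        have hmide : mid = (lo + hi) / 2 := by
          rw [hmid, PySem.Int.floordiv_eq_ediv_of_pos (by norm_num : (0:Int) < 2)]
        have hb1 : lo ≤ mid := by rw [hmide]; omega
        have hb2 : mid < hi := by rw [hmide]; omega
        have hmlen : mid.toNat < l.length := by omega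
        have hget : PySem.List.pyGetD l mid 0 = l[mid.toNat] :=
          PySem.List.pyGetD_eq_getElem l 0 (by omega) (by omega)
        rw [pyBisectLeft]
        simp only [if_pos hlt, ← hmid, hget]
        split_ifs with hcmp
        · apply ih (mid + 1) hi (by omega) (by omega) (by omega) hhl
          · intro j hj h
            have : j ≤ mid.toNat := by omega
            calc l[j] ≤ l[mid.toNat] := hmono j mid.toNat h hmlen this
              _ < x := hcmp
          · exact hhigh
        · apply ih lo mid (by omega) h0 hb1 (by omega) hlow
          intro j hj h
          rw [not_lt] at hcmp
          calc x ≤ l[mid.toNat] := hcmp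
            _ ≤ l[j] := hmono mid.toNat j hmlen h (by omega)
  intro lo hi h0 hlh hhl hlow hhigh
  exact H (hi - lo).toNat lo hi le_rfl h0 hlh hhl hlow hhigh

lemma bl_full (l : List Int) (x : Int) (hs : l.Pairwise (· ≤ ·)) :
    pyBisectLeft l x 0 l.length = (l.countP (fun q => decide (q < x)) : Int) := by
  refine bl_count l x hs 0 l.length le_rfl (by positivity) le_rfl ?_ ?_
  · intro j hj _; omega
  · intro j hj _; exfalso; omega

lemma bl_count_ge (l : List Int) (x : Int) (hs : l.Pairwise (· ≤ ·)) :
    (l.length : Int) - pyBisectLeft l x 0 l.length = (l.countP (fun q => decide (x ≤ q)) : Int) := by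
  rw [bl_full l x hs]
  have h := List.length_eq_countP_add_countP (fun q => decide (q < x)) (l := l)
  have h2 : l.countP (fun a => decide ¬(decide (a < x)) = true) = l.countP (fun q => decide (x ≤ q)) := by
    apply List.countP_congr
    intro a _
    simp only [decide_eq_true_eq, not_lt]
  omega

lemma count_le_of_getElem_not_lt (l : List Int) (p : Int)
    (hmono : ∀ (i j : Nat) (hi : i < l.length) (hj : j < l.length), i ≤ j → l[i] ≤ l[j])
    (i : Nat) (hi : i < l.length) (h : ¬ l[i] < p) :
    l.countP (fun q => decide (q < p)) ≤ i := by
  conv_lhs => rw [← List.take_append_drop i l, List.countP_append]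
  have h1 : (l.take i).countP (fun q => decide (q < p)) ≤ i := by
    calc _ ≤ (l.take i).length := List.countP_le_length
      _ ≤ i := by simp [List.length_take]
  have h2 : (l.drop i).countP (fun q => decide (q < p)) = 0 := by
    rw [List.countP_eq_zero]
    intro a ha
    rw [List.mem_iff_getElem] at ha
    obtain ⟨k, hk, rfl⟩ := ha
    rw [List.getElem_drop]
    simp only [List.length_drop] at hk
    have := hmono i (i + k) hi (by omega) (by omega)
    simp only [decide_eq_true_eq]
    omega
  omega

lemma lt_count_of_getElem_lt (l : List Int) (p : Int)
    (hmono : ∀ (i j : Nat) (hi : i < l.length) (hj : j < l.length), i ≤ j → l[i] ≤ l[j])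
    (i : Nat) (hi : i < l.length) (h : l[i] < p) :
    i < l.countP (fun q => decide (q < p)) := by
  conv_rhs => rw [← List.take_append_drop (i+1) l, List.countP_append]
  have h1 : (l.take (i+1)).countP (fun q => decide (q < p)) = i + 1 := by
    rw [List.countP_eq_length_filter, List.filter_eq_self.2, List.length_take]
    · omega
    · intro a ha
      rw [List.mem_iff_getElem] at ha
      obtain ⟨k, hk, rfl⟩ := ha
      rw [List.getElem_take]
      simp only [List.length_take] at hk
      have := hmono k i (by omega) hi (by omega)
      simp only [decide_eq_true_eq]
      omega
  omega

lemma sorted_take_lt (l : List Int) (p : Int) (hs : l.Pairwise (· ≤ ·))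
    (a : Int) (ha : a ∈ l.take (l.countP (fun q => decide (q < p)))) : a < p := by
  have hmono : ∀ (i j : Nat) (hi : i < l.length) (hj : j < l.length), i ≤ j → l[i] ≤ l[j] := by
    intro i j hi hj hij
    rcases Nat.lt_or_ge i j with h | h
    · exact (List.pairwise_iff_getElem.1 hs) i j hi hj h
    · have : i = j := by omega
      subst this; rfl
  rw [List.mem_iff_getElem] at ha
  obtain ⟨i, hi, rfl⟩ := ha
  rw [List.getElem_take]
  simp only [List.length_take] at hi
  by_contra h
  have := count_le_of_getElem_not_lt l p hmono i (by omega) (by rw [not_lt] at h; omega)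
  omega

lemma sorted_drop_ge (l : List Int) (p : Int) (hs : l.Pairwise (· ≤ ·))
    (a : Int) (ha : a ∈ l.drop (l.countP (fun q => decide (q < p)))) : p ≤ a := by
  have hmono : ∀ (i j : Nat) (hi : i < l.length) (hj : j < l.length), i ≤ j → l[i] ≤ l[j] := by
    intro i j hi hj hij
    rcases Nat.lt_or_ge i j with h | h
    · exact (List.pairwise_iff_getElem.1 hs) i j hi hj h
    · have : i = j := by omega
      subst this; rfl
  rw [List.mem_iff_getElem] at ha
  obtain ⟨i, hi, rfl⟩ := ha
  rw [List.getElem_drop]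
  simp only [List.length_drop] at hi
  by_contra h
  have := lt_count_of_getElem_lt l p hmono (l.countP (fun q => decide (q < p)) + i) (by omega)
      (by rw [not_le] at h; omega)
  omega

lemma insert_perm (l : List Int) (p : Int) (hs : l.Pairwise (· ≤ ·)) :
    (PySem.List.slice l none (some (pyBisectLeft l p 0 l.length)) ++ [p] ++
      PySem.List.slice l (some (pyBisectLeft l p 0 l.length)) none).Perm (p :: l) := by
  rw [bl_full l p hs]
  rw [PySem.List.slice_to l (by positivity), PySem.List.slice_from l (by positivity)]
  simp only [Int.toNat_natCast]
  rw [List.append_assoc, List.singleton_append]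
  calc (l.take _ ++ p :: l.drop _).Perm (p :: (l.take _ ++ l.drop _)) := List.perm_middle
    _ = p :: l := by rw [List.take_append_drop]

lemma insert_sorted (l : List Int) (p : Int) (hs : l.Pairwise (· ≤ ·)) :
    (PySem.List.slice l none (some (pyBisectLeft l p 0 l.length)) ++ [p] ++
      PySem.List.slice l (some (pyBisectLeft l p 0 l.length)) none).Pairwise (· ≤ ·) := by
  rw [bl_full l p hs]
  rw [PySem.List.slice_to l (by positivity), PySem.List.slice_from l (by positivity)]
  simp only [Int.toNat_natCast]
  rw [List.append_assoc, List.singleton_append, List.pairwise_append]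
  refine ⟨hs.sublist (List.take_sublist _ _), ?_, ?_⟩
  · rw [List.pairwise_cons]
    exact ⟨fun b hb => sorted_drop_ge l p hs b hb, hs.sublist (List.drop_sublist _ _)⟩
  · intro a ha b hb
    have h1 := sorted_take_lt l p hs a ha
    rcases List.mem_cons.1 hb with rfl | hb
    · omega
    · have := sorted_drop_ge l p hs b hb
      omega

lemma npres_append (l : List Int) (x : Int) : npres (l ++ [x]) = npres l ++ [l.sum + x] := by
  induction l with
  | nil => simp [npres]
  | cons a t ih =>
    simp only [List.cons_append, npres, ih, List.map_append, List.sum_cons]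
    simp [add_assoc]

lemma presL_nil : presL [] = [0] := by rfl

lemma presL_append (c : List Int) (x : Int) : presL (c ++ [x]) = presL c ++ [c.sum + x] := by
  unfold presL
  rw [List.length_append, List.length_singleton]
  rw [show c.length + 1 + 1 = (c.length + 1) + 1 from rfl, List.range_succ, List.map_append]
  congr 1
  · apply List.map_congr_left
    intro k hk
    rw [List.mem_range] at hk
    rw [List.take_append_of_le_length (by omega)]
  · simp

lemma innerA (A : List Int) (B : Int) :
    ∀ (fuel : Nat), ∀ (s : Nat), A.length - s ≤ fuel → s ≤ A.length → ∀ acc c0 : Int,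
    ((PySem.List.pyRange (s : Int) (A.length : Int)).foldl (aInnerStep A B) (acc, c0)).2
      = c0 + ((npres (A.drop s)).countP (fun t => decide (acc + t ≤ B)) : Int) := by
  intro fuel
  induction fuel with
  | zero =>
    intro s hf hs acc c0
    have : s = A.length := by omega
    subst this
    rw [List.drop_length]
    have h : PySem.List.pyRange (A.length : Int) (A.length : Int) = [] := by
      simp [PySem.List.pyRange]
    rw [h]
    simp [npres]
  | succ n ih =>
    intro s hf hs acc c0
    rcases Nat.eq_or_lt_of_le hs with heq | hlt
    · subst heq
      rw [List.drop_length]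
      have h : PySem.List.pyRange (A.length : Int) (A.length : Int) = [] := by
        simp [PySem.List.pyRange]
      rw [h]
      simp [npres]
    · rw [PySem.List.pyRange_one_cons (by exact_mod_cast hlt)]
      rw [List.foldl_cons]
      have hget : PySem.List.pyGetD A (s : Int) 0 = A[s] :=
        PySem.List.pyGetD_eq_getElem A 0 (by positivity) (by exact_mod_cast hlt)
      have hdrop : A.drop s = A[s] :: A.drop (s + 1) := List.drop_eq_getElem_cons hlt
      have hstep : aInnerStep A B (acc, c0) (s : Int)
          = (acc + A[s], if acc + A[s] ≤ B then c0 + 1 else c0) := by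
        simp [aInnerStep, hget]
      rw [hstep]
      have hcast : ((s : Int) + 1) = ((s + 1 : Nat) : Int) := by push_cast; ring
      rw [hcast, ih (s + 1) (by omega) (by omega)]
      rw [hdrop]
      simp only [npres, List.countP_cons, List.countP_map]
      have hcongr : (npres (A.drop (s+1))).countP ((fun t => decide (acc + t ≤ B)) ∘ (A[s] + ·))
          = (npres (A.drop (s+1))).countP (fun t => decide (acc + A[s] + t ≤ B)) := by
        apply List.countP_congr
        intro a _
        simp only [Function.comp_apply, decide_eq_true_eq]
        constructor <;> intro <;> omega
      rw [hcongr]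
      by_cases hc : acc + A[s] ≤ B <;>
        simp only [hc, decide_true, decide_false, if_true, if_false] <;> push_cast <;> ring

lemma portA_eq_aSum (A : List Int) (B : Int) : NumOfSubArray A B = aSum A B := by
  simp only [NumOfSubArray]
  rw [PySem.List.pyRange_zero_natCast, List.foldl_map]
  have hcong := PySem.List.foldl_congr_mem (l := List.range A.length) (init := (0:Int))
    (f := fun x (y : Nat) => (List.foldl (aInnerStep A B) (0, x) (PySem.List.pyRange (y : Int) (A.length : Int))).2)
    (g := fun count (s : Nat) => count + (List.countP (fun t => decide (t ≤ B)) (npres (A.drop s)) : Int))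
    (by
      intro acc s hsm
      rw [List.mem_range] at hsm
      show (List.foldl (aInnerStep A B) (0, acc) (PySem.List.pyRange (s : Int) (A.length : Int))).2
        = acc + (List.countP (fun t => decide (t ≤ B)) (npres (A.drop s)) : Int)
      rw [innerA A B (A.length - s) s (by omega) (by omega)]
      congr 1
      exact congrArg _ (List.countP_congr (by intro a _; simp)))
  rw [hcong, PySem.List.foldl_add]
  unfold aSum
  simp

lemma hsplit_sum (l : List Int) (s : Nat) : (l.take s).sum + (l.drop s).sum = l.sum := by
  rw [← List.sum_append, List.take_append_drop]

lemma aSum_append (l : List Int) (x B : Int) :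
    aSum (l ++ [x]) B = aSum l B + (List.countP (fun q => decide (l.sum + x - q ≤ B)) (presL l) : Int) := by
  unfold aSum presL
  rw [List.length_append, List.length_singleton, List.range_succ, List.map_append, List.sum_append,
      List.map_append, List.countP_append, List.countP_map, List.countP_map]
  have hkey : List.map (fun s => (List.countP (fun t => decide (t ≤ B)) (npres ((l ++ [x]).drop s)) : Int)) (List.range l.length)
      = List.map (fun s => (List.countP (fun t => decide (t ≤ B)) (npres (l.drop s)) : Int)
          + (if decide (l.sum + x - (l.take s).sum ≤ B) = true then 1 else 0)) (List.range l.length) := by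
    apply List.map_congr_left
    intro s hs
    rw [List.mem_range] at hs
    rw [List.drop_append_of_le_length (by omega), npres_append, List.countP_append]
    have hiff : ((l.drop s).sum + x ≤ B) ↔ (l.sum + x - (l.take s).sum ≤ B) := by
      have := hsplit_sum l s; omega
    simp only [List.countP_cons, List.countP_nil, decide_eq_true_eq]
    by_cases hc : (l.drop s).sum + x ≤ B
    · rw [if_pos hc, if_pos (by omega)]; push_cast; ring
    · rw [if_neg hc, if_neg (by rw [← hiff]; exact hc)]; push_cast; ring
  rw [hkey]
  have hsum := PySem.List.sum_map_add_int (List.range l.length)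
    (fun s => (List.countP (fun t => decide (t ≤ B)) (npres (l.drop s)) : Int))
    (fun s => if decide (l.sum + x - (l.take s).sum ≤ B) = true then (1:Int) else 0)
  rw [hsum]
  have hind := PySem.List.sum_map_ite_one_zero
    (fun s : Nat => decide (l.sum + x - (l.take s).sum ≤ B)) (List.range l.length)
  rw [hind]
  have hlast1 : List.map (fun s => (List.countP (fun t => decide (t ≤ B)) (npres ((l ++ [x]).drop s)) : Int)) [l.length]
      = [if decide (x ≤ B) = true then 1 else 0] := by
    simp only [List.map_cons, List.map_nil]
    rw [List.drop_append_of_le_length (by omega), List.drop_length]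
    simp [npres, List.countP_cons]
  rw [hlast1]
  have hlast2 : List.countP ((fun q => decide (l.sum + x - q ≤ B)) ∘ fun k => ((l.take k).sum : Int)) [l.length]
      = if decide (x ≤ B) = true then 1 else 0 := by
    simp only [List.countP_cons, List.countP_nil, Function.comp_apply, List.take_length]
    have h : (l.sum + x - l.sum ≤ B) ↔ (x ≤ B) := by omega
    by_cases hc : x ≤ B
    · simp [hc]
    · simp [hc]
  rw [hlast2]
  have hcongr2 : List.countP ((fun q => decide (l.sum + x - q ≤ B)) ∘ fun k => ((l.take k).sum : Int)) (List.range l.length)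
      = List.countP (fun s : Nat => decide (l.sum + x - (l.take s).sum ≤ B)) (List.range l.length) := by
    apply List.countP_congr; intro a _; rfl
  rw [hcongr2]
  simp only [List.sum_cons, List.sum_nil]
  push_cast
  by_cases hc : x ≤ B <;> simp [hc] <;> ring

lemma gcount_append (B x : Int) :
    ∀ (r c : List Int), gcount B c (r ++ [x])
      = gcount B c r + (List.countP (fun q => decide ((c ++ r).sum + x - q ≤ B)) (presL (c ++ r)) : Int) := by
  intro r
  induction r with
  | nil =>
    intro c
    simp only [List.nil_append, List.append_nil, gcount]
    ring
  | cons y r ih =>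
    intro c
    simp only [List.cons_append, gcount]
    rw [ih (c ++ [y])]
    simp only [List.append_assoc, List.cons_append, List.nil_append]
    ring

lemma aSum_eq_gcount (A : List Int) (B : Int) : aSum A B = gcount B [] A := by
  induction A using List.reverseRecOn with
  | nil => rfl
  | append_singleton l x ih =>
    rw [aSum_append, gcount_append, ih, List.nil_append]

lemma altLoop (B : Int) :
    ∀ (rest : List Int) (c : List Int) (count : Int) (prefs : List Int),
      prefs.Perm (presL c) → prefs.Pairwise (· ≤ ·) →
      (rest.foldl (altStep B) (count, c.sum, prefs)).1 = count + gcount B c rest := by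
  intro rest
  induction rest with
  | nil =>
    intro c count prefs _ _
    simp [gcount]
  | cons x r ih =>
    intro c count prefs hperm hsorted
    rw [List.foldl_cons]
    have hstep : altStep B (count, c.sum, prefs) x
        = (count + ((prefs.length : Int) - pyBisectLeft prefs (c.sum + x - B) 0 prefs.length),
           c.sum + x,
           PySem.List.slice prefs none (some (pyBisectLeft prefs (c.sum + x) 0 prefs.length)) ++ [c.sum + x] ++
             PySem.List.slice prefs (some (pyBisectLeft prefs (c.sum + x) 0 prefs.length)) none) := by
      simp [altStep]
    rw [hstep]
    have hsum : c.sum + x = (c ++ [x]).sum := by simp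
    have hperm' : (PySem.List.slice prefs none (some (pyBisectLeft prefs (c.sum + x) 0 prefs.length)) ++ [c.sum + x] ++
        PySem.List.slice prefs (some (pyBisectLeft prefs (c.sum + x) 0 prefs.length)) none).Perm (presL (c ++ [x])) := by
      refine (insert_perm prefs (c.sum + x) hsorted).trans ?_
      rw [presL_append]
      refine (hperm.cons (c.sum + x)).trans ?_
      simpa using (List.perm_middle (a := c.sum + x) (l₁ := presL c) (l₂ := ([] : List Int))).symm
    have hsorted' := insert_sorted prefs (c.sum + x) hsorted
    have happ := ih (c ++ [x])
      (count + ((prefs.length : Int) - pyBisectLeft prefs (c.sum + x - B) 0 prefs.length))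
      _ hperm' hsorted'
    rw [← hsum] at happ
    rw [happ]
    have hcount : (prefs.length : Int) - pyBisectLeft prefs (c.sum + x - B) 0 prefs.length
        = (List.countP (fun q => decide (c.sum + x - q ≤ B)) (presL c) : Int) := by
      rw [bl_count_ge prefs (c.sum + x - B) hsorted]
      rw [hperm.countP_eq]
      congr 1
      apply List.countP_congr
      intro a _
      simp only [decide_eq_true_eq]
      constructor <;> intro <;> omega
    rw [hcount]
    show _ = count + gcount B c (x :: r)
    rw [gcount]
    ring

lemma portB_eq_gcount (A : List Int) (B : Int) : NumOfSubArray_alt A B = gcount B [] A := by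
  unfold NumOfSubArray_alt
  have h := altLoop B A [] 0 [0] (by rw [presL_nil]) (by simp)
  simp only [List.sum_nil] at h
  rw [h, zero_add]

-- ===== VERDICT (by name: the statement is the Claim_ definition above) =====
theorem NumOfSubArray_spec : Claim_equal_NumOfSubArray := by
  intro A B _
  unfold Spec_NumOfSubArray
  rw [portA_eq_aSum, aSum_eq_gcount, portB_eq_gcount]
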